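-- pv_equiv track=rewrite | github.com/erturkmemmedli/Data-Structures-and-Algorithms | Algorithmic Toolbox/Dynamic Programming/lcs2.py | matching_matrix
-- ===== SOURCE A (Python) =====
-- def matching_matrix(first_sequence, second_sequence):
--     n = len(first_sequence)
--     m = len(second_sequence)
--     A = [[0] * (m+1) for _ in range(n+1)]
--     for i in range(1, n+1):
--         A[i][0] = 0
--     for i in range(1, m+1):
--         A[0][i] = 0
--     for i in range(1, n+1):
--         for j in range(1, m+1):
--             left = A[i][j-1]
--             top = A[i-1][j]
--             diagonal = A[i-1][j-1]
--             match = A[i-1][j-1] + 1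
--             if first_sequence[i-1] == second_sequence[j-1] and left == top == diagonal:
--                 A[i][j] = max(left, top, match)
--             else:
--                 A[i][j] = max(left, top, diagonal)
--     return A
-- ===== SOURCE B (Python) =====
-- def matching_matrix(first_sequence, second_sequence):
--     # Top-down memoized standard LCS recurrence; A's bottom-up quirky rule
--     # (diag+1 only when left==top==diag) provably computes the same table,
--     # because in the LCS table neighbours differ from diag by at most 1.
--     memo = {}
--
--     def cell(i, j):
--         if i == 0 or j == 0:
--             return 0
--         key = (i, j)
--         if key in memo:
--             return memo[key]
--         if first_sequence[i - 1] == second_sequence[j - 1]: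
--             v = cell(i - 1, j - 1) + 1
--         else:
--             v = max(cell(i - 1, j), cell(i, j - 1))
--         memo[key] = v
--         return v
--
--     return [[cell(i, j) for j in range(len(second_sequence) + 1)]
--             for i in range(len(first_sequence) + 1)]
-- ===== Notes on version B (the rewrite author's own statement) =====
-- stated objective: alternative
-- what changed: Replaces the bottom-up double loop with the quirky 'diag+1 only when left==top==diag' rule by top-down memoized recursion using the standard LCS recurrence (match -> diag+1, else max(top,left)), which provably yields the identical table.
import Mathlib
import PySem

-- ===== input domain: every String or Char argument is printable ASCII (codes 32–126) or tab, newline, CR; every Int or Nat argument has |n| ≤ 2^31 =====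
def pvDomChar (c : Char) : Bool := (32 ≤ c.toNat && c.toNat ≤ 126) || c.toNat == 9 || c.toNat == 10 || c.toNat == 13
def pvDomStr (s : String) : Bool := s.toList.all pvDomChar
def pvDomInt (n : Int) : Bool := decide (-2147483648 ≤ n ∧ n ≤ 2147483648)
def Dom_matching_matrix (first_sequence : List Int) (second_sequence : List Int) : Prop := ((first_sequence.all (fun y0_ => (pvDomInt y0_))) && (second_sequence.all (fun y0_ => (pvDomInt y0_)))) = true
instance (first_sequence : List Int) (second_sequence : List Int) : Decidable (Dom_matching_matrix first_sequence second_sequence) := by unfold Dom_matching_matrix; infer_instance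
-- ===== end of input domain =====

-- B replaces A's bottom-up double loop with its quirky 'diag+1 only when left==top==diagonal'
-- branch by top-down memoized recursion on the standard LCS recurrence; same table, proved equal.

-- ===== PORT A =====
-- A[i][j] read (indices are always in range in A's loops, so the getD default is never hit)
def getCell (A : List (List Int)) (i j : Nat) : Int := (A.getD i []).getD j 0
-- A[i][j] = v write
def setCell (A : List (List Int)) (i j : Nat) (v : Int) : List (List Int) :=
  A.set i ((A.getD i []).set j v)

-- literal transliteration of A ('for i in range(1, n+1)' becomes a fold over List.range n with i = i0+1)
def matching_matrix (first_sequence : List Int) (second_sequence : List Int) : List (List Int) :=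
  let n := first_sequence.length
  let m := second_sequence.length
  let A := (List.range (n+1)).map (fun _ => List.replicate (m+1) (0 : Int))
  let A := (List.range n).foldl (fun A i0 => setCell A (i0+1) 0 0) A
  let A := (List.range m).foldl (fun A i0 => setCell A 0 (i0+1) 0) A
  (List.range n).foldl (fun A i0 =>
    (List.range m).foldl (fun A j0 =>
      let i := i0 + 1
      let j := j0 + 1
      let left := getCell A i (j-1)
      let top := getCell A (i-1) j
      let diagonal := getCell A (i-1) (j-1)
      let mtch := getCell A (i-1) (j-1) + 1
      if first_sequence.getD (i-1) 0 = second_sequence.getD (j-1) 0 ∧ left = top ∧ top = diagonal then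
        setCell A i j (max (max left top) mtch)
      else
        setCell A i j (max (max left top) diagonal)) A) A

-- ===== PORT B =====
-- Source B's memoized recursive helper 'cell'; the memo dict is threaded through explicitly
def cellB (f s : List Int) : Nat → Nat → PySem.Dict (Nat × Nat) Int →
    Int × PySem.Dict (Nat × Nat) Int
  | 0, _, memo => (0, memo)
  | _+1, 0, memo => (0, memo)
  | i+1, j+1, memo =>
    match memo.get? (i+1, j+1) with
    | some v => (v, memo)
    | none =>
      let r :=
        if f.getD i 0 = s.getD j 0 then
          let p := cellB f s i j memo
          (p.1 + 1, p.2)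
        else
          let p := cellB f s i (j+1) memo
          let q := cellB f s (i+1) j p.2
          (max p.1 q.1, q.2)
      (r.1, r.2.insert (i+1, j+1) r.1)
  termination_by i j _ => i + j

-- Source B's nested list comprehensions, threading the memo
def matching_matrix_alt (first_sequence : List Int) (second_sequence : List Int) : List (List Int) :=
  let n := first_sequence.length
  let m := second_sequence.length
  ((List.range (n+1)).foldl (fun (acc : List (List Int) × PySem.Dict (Nat × Nat) Int) i =>
      let rm := (List.range (m+1)).foldl
        (fun (racc : List Int × PySem.Dict (Nat × Nat) Int) j =>
          let p := cellB first_sequence second_sequence i j racc.2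
          (racc.1 ++ [p.1], p.2)) ([], acc.2)
      (acc.1 ++ [rm.1], rm.2)) ([], PySem.Dict.empty)).1

-- ===== PRECONDITION & SPEC =====
def Spec_matching_matrix (first_sequence : List Int) (second_sequence : List Int) (out : List (List Int)) : Prop := out = matching_matrix_alt first_sequence second_sequence
instance (first_sequence : List Int) (second_sequence : List Int) (out : List (List Int)) : Decidable (Spec_matching_matrix first_sequence second_sequence out) := by unfold Spec_matching_matrix; infer_instance

-- ===== CLAIM (what is proved, stated in full; the proofs are below) =====
def Claim_equal_matching_matrix : Prop := ∀ (first_sequence : List Int) (second_sequence : List Int), Dom_matching_matrix first_sequence second_sequence → Spec_matching_matrix first_sequence second_sequence (matching_matrix first_sequence second_sequence)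

-- ===== LEMMAS AND PROOFS =====

-- the standard LCS value on prefixes of lengths i and j: the common table both ports build
def L (f s : List Int) : Nat → Nat → Int
  | 0, _ => 0
  | _+1, 0 => 0
  | i+1, j+1 =>
    if f.getD i 0 = s.getD j 0 then L f s i j + 1
    else max (L f s i (j+1)) (L f s (i+1) j)
  termination_by i j => i + j

theorem L_zero_left (f s : List Int) (j : Nat) : L f s 0 j = 0 := by rw [L]

theorem L_zero_right (f s : List Int) (i : Nat) : L f s i 0 = 0 := by cases i <;> rw [L]

theorem L_succ_succ (f s : List Int) (i j : Nat) :
    L f s (i+1) (j+1) = if f.getD i 0 = s.getD j 0 then L f s i j + 1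
      else max (L f s i (j+1)) (L f s (i+1) j) := by rw [L]

-- neighbour bounds of the LCS table (strong induction on i+j)
theorem L_bounds (f s : List Int) : ∀ (N i j : Nat), i + j ≤ N →
    (L f s i j ≤ L f s (i+1) j ∧ L f s (i+1) j ≤ L f s i j + 1) ∧
    (L f s i j ≤ L f s i (j+1) ∧ L f s i (j+1) ≤ L f s i j + 1) := by
  intro N
  induction N with
  | zero =>
    intro i j h
    have hi : i = 0 := by omega
    have hj : j = 0 := by omega
    subst hi; subst hj
    simp [L_zero_left, L_zero_right]
  | succ N ih =>
    intro i j h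
    constructor
    · cases j with
      | zero => simp [L_zero_right]
      | succ j' =>
        have IH1 := (ih i j' (by omega)).1
        have IH2 := (ih i j' (by omega)).2
        rw [L_succ_succ f s i j']
        split <;> omega
    · cases i with
      | zero => simp [L_zero_left]
      | succ i' =>
        have IH := (ih i' j (by omega)).1
        have IHR := (ih i' j (by omega)).2
        rw [L_succ_succ f s i' j]
        split <;> omega

-- A's quirky branch computes L (i+1) (j+1) from the three neighbours
theorem stepA_eq (f s : List Int) (i j : Nat) :
    (if f.getD i 0 = s.getD j 0 ∧ L f s (i+1) j = L f s i (j+1) ∧ L f s i (j+1) = L f s i j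
      then max (max (L f s (i+1) j) (L f s i (j+1))) (L f s i j + 1)
      else max (max (L f s (i+1) j) (L f s i (j+1))) (L f s i j))
    = L f s (i+1) (j+1) := by
  have B1 := (L_bounds f s (i + j) i j le_rfl).1
  have B2 := (L_bounds f s (i + j) i j le_rfl).2
  rw [L_succ_succ f s i j]
  split
  · rename_i h
    rw [if_pos h.1]
    omega
  · rename_i h
    by_cases hm : f.getD i 0 = s.getD j 0
    · rw [if_pos hm]
      have : ¬ (L f s (i+1) j = L f s i (j+1) ∧ L f s i (j+1) = L f s i j) := by tauto
      omega
    · rw [if_neg hm]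
      omega

-- === B side: the memoized recursion computes L ===

def memoOK (f s : List Int) (d : PySem.Dict (Nat × Nat) Int) : Prop :=
  ∀ i j v, d.get? (i, j) = some v → v = L f s i j

theorem cellB_correct (f s : List Int) : ∀ (N i j : Nat) (d : PySem.Dict (Nat × Nat) Int),
    i + j ≤ N → memoOK f s d →
    (cellB f s i j d).1 = L f s i j ∧ memoOK f s (cellB f s i j d).2 := by
  intro N
  induction N with
  | zero =>
    intro i j d h hd
    have hi : i = 0 := by omega
    subst hi
    simpa [cellB, L_zero_left] using hd
  | succ N ih =>
    intro i j d h hd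
    match i, j with
    | 0, j => simpa [cellB, L_zero_left] using hd
    | i+1, 0 => simpa [cellB, L_zero_right] using hd
    | i+1, j+1 =>
      rw [cellB]
      cases hg : d.get? (i+1, j+1) with
      | some v =>
        simp only []
        exact ⟨hd _ _ _ hg, hd⟩
      | none =>
        simp only []
        by_cases hm : f.getD i 0 = s.getD j 0
        · rw [if_pos hm]
          have h1 := ih i j d (by omega) hd
          have hv : (cellB f s i j d).1 + 1 = L f s (i+1) (j+1) := by
            rw [L_succ_succ, if_pos hm, h1.1]
          refine ⟨hv, ?_⟩
          intro a b w hw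
          rw [PySem.Dict.get?_insert] at hw
          split at hw
          · rename_i he
            cases hw
            obtain ⟨ha, hb⟩ := Prod.mk.injEq .. ▸ he
            subst ha; subst hb
            exact hv
          · exact h1.2 _ _ _ hw
        · rw [if_neg hm]
          have h1 := ih i (j+1) d (by omega) hd
          have h2 := ih (i+1) j (cellB f s i (j+1) d).2 (by omega) h1.2
          have hv : max (cellB f s i (j+1) d).1 (cellB f s (i+1) j (cellB f s i (j+1) d).2).1
              = L f s (i+1) (j+1) := by
            rw [L_succ_succ, if_neg hm, h1.1, h2.1]
          refine ⟨hv, ?_⟩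
          intro a b w hw
          rw [PySem.Dict.get?_insert] at hw
          split at hw
          · rename_i he
            cases hw
            obtain ⟨ha, hb⟩ := Prod.mk.injEq .. ▸ he
            subst ha; subst hb
            exact hv
          · exact h2.2 _ _ _ hw

theorem foldB_row (f s : List Int) (i : Nat) : ∀ (js : List Nat) (r0 : List Int)
    (d : PySem.Dict (Nat × Nat) Int), memoOK f s d →
    (js.foldl (fun (racc : List Int × PySem.Dict (Nat × Nat) Int) j =>
        let p := cellB f s i j racc.2
        (racc.1 ++ [p.1], p.2)) (r0, d)).1 = r0 ++ js.map (L f s i) ∧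
    memoOK f s (js.foldl (fun (racc : List Int × PySem.Dict (Nat × Nat) Int) j =>
        let p := cellB f s i j racc.2
        (racc.1 ++ [p.1], p.2)) (r0, d)).2 := by
  intro js
  induction js with
  | nil => intro r0 d hd; simpa using hd
  | cons j js ih =>
    intro r0 d hd
    have hc := cellB_correct f s (i + j) i j d le_rfl hd
    simp only [List.foldl_cons, List.map_cons]
    rw [hc.1]
    have := ih (r0 ++ [L f s i j]) (cellB f s i j d).2 hc.2
    simpa using this

theorem foldB_outer (f s : List Int) (m : Nat) : ∀ (is : List Nat) (acc0 : List (List Int))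
    (d : PySem.Dict (Nat × Nat) Int), memoOK f s d →
    (is.foldl (fun (acc : List (List Int) × PySem.Dict (Nat × Nat) Int) i =>
        let rm := (List.range (m+1)).foldl
          (fun (racc : List Int × PySem.Dict (Nat × Nat) Int) j =>
            let p := cellB f s i j racc.2
            (racc.1 ++ [p.1], p.2)) ([], acc.2)
        (acc.1 ++ [rm.1], rm.2)) (acc0, d)).1
      = acc0 ++ is.map (fun i => (List.range (m+1)).map (L f s i)) := by
  intro is
  induction is with
  | nil => intro acc0 d hd; simp
  | cons i is ih =>
    intro acc0 d hd
    have hr := foldB_row f s i (List.range (m+1)) [] d hd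
    simp only [List.foldl_cons, List.map_cons]
    rw [hr.1]
    have := ih (acc0 ++ [[] ++ (List.range (m+1)).map (L f s i)])
        ((List.range (m+1)).foldl
          (fun (racc : List Int × PySem.Dict (Nat × Nat) Int) j =>
            let p := cellB f s i j racc.2
            (racc.1 ++ [p.1], p.2)) ([], d)).2 hr.2
    simpa using this

theorem alt_eq_table (f s : List Int) :
    matching_matrix_alt f s = (List.range (f.length+1)).map
      (fun i => (List.range (s.length+1)).map (L f s i)) := by
  have hd : memoOK f s PySem.Dict.empty := by
    intro a b v hv
    simp [PySem.Dict.get?_empty] at hv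
  have := foldB_outer f s s.length (List.range (f.length+1)) [] PySem.Dict.empty hd
  simpa [matching_matrix_alt] using this

-- === A side: the in-place double loop builds the same table ===

-- a matrix given pointwise by g
def Mg (n m : Nat) (g : Nat → Nat → Int) : List (List Int) :=
  (List.range (n+1)).map (fun r => (List.range (m+1)).map (g r))

theorem getCell_Mg (n m : Nat) (g : Nat → Nat → Int) (i j : Nat)
    (hi : i < n+1) (hj : j < m+1) : getCell (Mg n m g) i j = g i j := by
  simp [getCell, Mg, List.getD, hi, hj]

theorem setCell_Mg (n m : Nat) (g : Nat → Nat → Int) (i j : Nat) (v : Int)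
    (hi : i < n+1) (hj : j < m+1) :
    setCell (Mg n m g) i j v
      = Mg n m (fun r c => if r = i ∧ c = j then v else g r c) := by
  apply List.ext_getElem
  · simp [setCell, Mg]
  · intro r h1 h2
    simp only [setCell, Mg, List.getD] at *
    rw [List.getElem_set]
    by_cases hri : i = r
    · subst hri
      simp [hi, List.getElem_map, List.getElem_range]
      apply List.ext_getElem
      · simp
      · intro c hc1 hc2
        rw [List.getElem_set]
        simp only [List.getElem_map, List.getElem_range]
        by_cases hcj : c = j
        · simp [hcj]
        · rw [if_neg (fun h => hcj h.symm), if_neg hcj]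
    · simp only [if_neg hri]
      simp only [List.getElem_map, List.getElem_range]
      apply List.map_congr_left
      intro c _
      rw [if_neg (fun hc => hri hc.1.symm)]

theorem Mg_congr (n m : Nat) (g g' : Nat → Nat → Int)
    (h : ∀ r < n+1, ∀ c < m+1, g r c = g' r c) : Mg n m g = Mg n m g' := by
  unfold Mg
  apply List.map_congr_left
  intro r hr
  rw [List.mem_range] at hr
  apply List.map_congr_left
  intro c hc
  rw [List.mem_range] at hc
  exact h r hr c hc

theorem foldl_fixed_mem {α β : Type} (f : β → α → β) (z : β) :
    ∀ (l : List α), (∀ a ∈ l, f z a = z) → l.foldl f z = z := by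
  intro l
  induction l with
  | nil => intro _; rfl
  | cons a l ih =>
    intro h
    rw [List.foldl_cons, h a (by simp)]
    exact ih (fun b hb => h b (by simp [hb]))

theorem replicate_as_map (k : Nat) :
    (List.range k).map (fun _ => (0:Int)) = List.replicate k 0 := by
  simp [List.map_const']

-- proof-side names for port A's loop bodies (definitionally the lambdas in matching_matrix)
def stepIn (f s : List Int) (i0 : Nat) : List (List Int) → Nat → List (List Int) :=
  fun A j0 =>
    let i := i0 + 1
    let j := j0 + 1
    let left := getCell A i (j-1)
    let top := getCell A (i-1) j
    let diagonal := getCell A (i-1) (j-1)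
    let mtch := getCell A (i-1) (j-1) + 1
    if f.getD (i-1) 0 = s.getD (j-1) 0 ∧ left = top ∧ top = diagonal then
      setCell A i j (max (max left top) mtch)
    else
      setCell A i j (max (max left top) diagonal)

def stepOut (f s : List Int) : List (List Int) → Nat → List (List Int) :=
  fun A i0 => (List.range s.length).foldl (stepIn f s i0) A

-- rows 0..k of the table done, the rest still zero
def gR (f s : List Int) (k : Nat) : Nat → Nat → Int :=
  fun r c => if r ≤ k then L f s r c else 0
-- rows 0..i done, row i+1 done up to column k, the rest still zero
def gI (f s : List Int) (i k : Nat) : Nat → Nat → Int :=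
  fun r c => if r ≤ i then L f s r c else if r = i+1 ∧ c ≤ k then L f s r c else 0

theorem stepIn_Mg (f s : List Int) (n m i k : Nat) (hi : i < n) (hm : m = s.length) (hk : k < m) :
    stepIn f s i (Mg n m (gI f s i k)) k = Mg n m (gI f s i (k+1)) := by
  have hL : getCell (Mg n m (gI f s i k)) (i+1) k = L f s (i+1) k := by
    rw [getCell_Mg _ _ _ _ _ (by omega) (by omega)]
    simp [gI]
  have hT : getCell (Mg n m (gI f s i k)) i (k+1) = L f s i (k+1) := by
    rw [getCell_Mg _ _ _ _ _ (by omega) (by omega)]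
    simp [gI]
  have hD : getCell (Mg n m (gI f s i k)) i k = L f s i k := by
    rw [getCell_Mg _ _ _ _ _ (by omega) (by omega)]
    simp [gI]
  show (if f.getD ((i+1)-1) 0 = s.getD ((k+1)-1) 0 ∧
          getCell (Mg n m (gI f s i k)) (i+1) ((k+1)-1) = getCell (Mg n m (gI f s i k)) ((i+1)-1) (k+1) ∧
          getCell (Mg n m (gI f s i k)) ((i+1)-1) (k+1) = getCell (Mg n m (gI f s i k)) ((i+1)-1) ((k+1)-1)
        then setCell (Mg n m (gI f s i k)) (i+1) (k+1)
              (max (max (getCell (Mg n m (gI f s i k)) (i+1) ((k+1)-1)) (getCell (Mg n m (gI f s i k)) ((i+1)-1) (k+1)))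
                (getCell (Mg n m (gI f s i k)) ((i+1)-1) ((k+1)-1) + 1))
        else setCell (Mg n m (gI f s i k)) (i+1) (k+1)
              (max (max (getCell (Mg n m (gI f s i k)) (i+1) ((k+1)-1)) (getCell (Mg n m (gI f s i k)) ((i+1)-1) (k+1)))
                (getCell (Mg n m (gI f s i k)) ((i+1)-1) ((k+1)-1)))) = Mg n m (gI f s i (k+1))
  simp only [Nat.add_sub_cancel]
  rw [hL, hT, hD]
  rw [← apply_ite (setCell (Mg n m (gI f s i k)) (i+1) (k+1))]
  rw [stepA_eq f s i k]
  rw [setCell_Mg _ _ _ _ _ _ (by omega) (by omega)]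
  apply Mg_congr
  intro r hr c hc
  by_cases h1 : r = i+1 ∧ c = k+1
  · simp [h1, gI]
  · rw [if_neg h1]
    simp only [gI]
    by_cases h2 : r ≤ i
    · simp [h2]
    · simp only [if_neg h2]
      by_cases h3 : r = i+1
      · have hck : ¬ c = k+1 := fun hcc => h1 ⟨h3, hcc⟩
        by_cases h4 : c ≤ k
        · rw [if_pos ⟨h3, h4⟩, if_pos ⟨h3, by omega⟩]
        · rw [if_neg (fun hx => h4 (by omega)), if_neg (fun hx => by omega)]
      · rw [if_neg (fun hx => h3 hx.1), if_neg (fun hx => h3 hx.1)]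

theorem innerA (f s : List Int) (n m i : Nat) (hi : i < n) (hm : m = s.length) :
    ∀ k, k ≤ m →
    (List.range k).foldl (stepIn f s i) (Mg n m (gI f s i 0)) = Mg n m (gI f s i k) := by
  intro k
  induction k with
  | zero => intro _; rfl
  | succ k ih =>
    intro hk
    rw [List.range_succ, List.foldl_append, ih (by omega)]
    simpa using stepIn_Mg f s n m i k hi hm (by omega)

theorem outerA (f s : List Int) (n : Nat) :
    ∀ k, k ≤ n →
    (List.range k).foldl (stepOut f s) (Mg n s.length (gR f s 0)) = Mg n s.length (gR f s k) := by
  intro k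
  induction k with
  | zero => intro _; rfl
  | succ k ih =>
    intro hk
    rw [List.range_succ, List.foldl_append, ih (by omega)]
    simp only [List.foldl_cons, List.foldl_nil]
    show stepOut f s (Mg n s.length (gR f s k)) k = _
    unfold stepOut
    have h1 : Mg n s.length (gR f s k) = Mg n s.length (gI f s k 0) := by
      apply Mg_congr
      intro r hr c hc
      simp only [gR, gI]
      by_cases h2 : r ≤ k
      · simp [h2]
      · rw [if_neg h2, if_neg h2]
        by_cases h3 : r = k+1 ∧ c ≤ 0
        · rw [if_pos h3]
          have : c = 0 := by omega
          subst this
          rw [L_zero_right]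
        · rw [if_neg h3]
    rw [h1, innerA f s n s.length k (by omega) rfl s.length le_rfl]
    apply Mg_congr
    intro r hr c hc
    simp only [gR, gI]
    by_cases h2 : r ≤ k
    · rw [if_pos h2, if_pos (by omega)]
    · rw [if_neg h2]
      by_cases h3 : r = k+1
      · rw [if_pos ⟨h3, by omega⟩, if_pos (by omega)]
      · rw [if_neg (fun hx => h3 hx.1), if_neg (by omega)]

theorem Z_eq (n m : Nat) :
    (List.range (n+1)).map (fun _ => List.replicate (m+1) (0:Int))
      = Mg n m (fun _ _ => 0) := by
  unfold Mg
  apply List.map_congr_left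
  intro r _
  rw [replicate_as_map]

theorem zloop1 (n m : Nat) :
    (List.range n).foldl (fun A i0 => setCell A (i0+1) 0 0) (Mg n m (fun _ _ => 0))
      = Mg n m (fun _ _ => 0) := by
  apply foldl_fixed_mem
  intro a ha
  rw [List.mem_range] at ha
  rw [setCell_Mg _ _ _ _ _ _ (by omega) (by omega)]
  apply Mg_congr
  intro r _ c _
  split <;> rfl

theorem zloop2 (n m : Nat) :
    (List.range m).foldl (fun A i0 => setCell A 0 (i0+1) 0) (Mg n m (fun _ _ => 0))
      = Mg n m (fun _ _ => 0) := by
  apply foldl_fixed_mem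
  intro a ha
  rw [List.mem_range] at ha
  rw [setCell_Mg _ _ _ _ _ _ (by omega) (by omega)]
  apply Mg_congr
  intro r _ c _
  split <;> rfl

theorem A_eq_table (f s : List Int) :
    matching_matrix f s = (List.range (f.length+1)).map
      (fun i => (List.range (s.length+1)).map (L f s i)) := by
  have hfold : matching_matrix f s = (List.range f.length).foldl (stepOut f s)
      ((List.range s.length).foldl (fun A i0 => setCell A 0 (i0+1) 0)
        ((List.range f.length).foldl (fun A i0 => setCell A (i0+1) 0 0)
          ((List.range (f.length+1)).map (fun _ => List.replicate (s.length+1) (0:Int))))) := rfl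
  rw [hfold, Z_eq, zloop1, zloop2]
  have h0 : Mg f.length s.length (fun _ _ => 0) = Mg f.length s.length (gR f s 0) := by
    apply Mg_congr
    intro r _ c _
    simp only [gR]
    split
    · rename_i h
      have : r = 0 := by omega
      subst this
      rw [L_zero_left]
    · rfl
  rw [h0, outerA f s f.length f.length le_rfl]
  apply List.map_congr_left
  intro r hr
  rw [List.mem_range] at hr
  apply List.map_congr_left
  intro c _
  simp only [gR]
  rw [if_pos (by omega)]

-- ===== VERDICT (by name: the statement is the Claim_ definition above) =====
theorem matching_matrix_spec : Claim_equal_matching_matrix := by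
  intro f s _
  unfold Spec_matching_matrix
  rw [A_eq_table, alt_eq_table]
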